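-- pv_equiv track=rewrite | github.com/krish-modi1/Team2-DR | optimization_fuyao/tictactoe_curve.py | transform_mask
-- ===== SOURCE A (Python) =====
-- from typing import List, Tuple, Dict, Iterable, Optional
--
-- def transform_mask(mask: int, mapping: List[int]) -> int:
--     new_mask = 0
--     m = mask
--     while m:
--         lsb = m & -m
--         p = (lsb.bit_length() - 1)
--         new_mask |= (1 << mapping[p])
--         m ^= lsb
--     return new_mask
-- ===== SOURCE B (Python) =====
-- def transform_mask(mask: int, mapping: list) -> int:
--     if mask == 0:
--         return 0
--     head = (1 << mapping[0]) if (mask & 1) else 0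
--     return head | transform_mask(mask >> 1, mapping[1:])
-- ===== Notes on version B (the rewrite author's own statement) =====
-- stated objective: alternative
-- what changed: B is a recursion on the structure of the problem: it peels bit 0 of the mask together with the head of the mapping list, recurses on mask>>1 with the mapping's tail, and ORs the contributions on the way back, instead of A's imperative loop that repeatedly isolates the lowest set bit with m & -m, recovers its position with bit_length, and clears it with xor.
import Mathlib
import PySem

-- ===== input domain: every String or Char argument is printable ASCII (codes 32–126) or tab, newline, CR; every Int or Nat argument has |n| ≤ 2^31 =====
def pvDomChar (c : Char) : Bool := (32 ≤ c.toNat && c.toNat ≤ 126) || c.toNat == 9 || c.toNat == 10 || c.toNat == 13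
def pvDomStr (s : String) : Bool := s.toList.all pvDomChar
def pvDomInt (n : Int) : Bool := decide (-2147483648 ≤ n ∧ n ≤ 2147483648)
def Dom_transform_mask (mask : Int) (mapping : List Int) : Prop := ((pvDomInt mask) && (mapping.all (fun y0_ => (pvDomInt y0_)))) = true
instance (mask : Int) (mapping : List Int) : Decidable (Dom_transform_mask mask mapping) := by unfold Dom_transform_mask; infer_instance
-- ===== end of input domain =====

-- B remaps the set bits by a recursion that peels bit 0 of the mask and the head of the
-- mapping, recursing on mask>>1 with the mapping's tail, instead of A's lowest-set-bit
-- extraction loop; same value on Pre_ (objective: alternative, not faster).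

-- ===== PORT A =====
-- while m: lsb = m & -m; p = lsb.bit_length() - 1; new_mask |= 1 << mapping[p]; m ^= lsb
-- fuel makes the loop total; 'none' from pyGet? (IndexError) and a negative shift amount
-- (ValueError) are where Python raises — those inputs are excluded by Pre_ below.
def tmLoopA (mapping : List Int) (fuel : Nat) (m acc : Int) : Int :=
  match fuel with
  | 0 => acc
  | fuel + 1 =>
    if m ≠ 0 then
      let lsb := PySem.Int.band m (-m)
      let p : Nat := PySem.Int.bitLength lsb - 1
      match PySem.List.pyGet? mapping (p : Int) with
      | none => acc
      | some mp =>
        if 0 ≤ mp then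
          tmLoopA mapping fuel (PySem.Int.bxor m lsb) (PySem.Int.bor acc ((1 : Int) <<< mp.toNat))
        else acc
    else acc

def transform_mask (mask : Int) (mapping : List Int) : Int :=
  tmLoopA mapping (mask.natAbs + 1) mask 0

-- ===== PORT B =====
-- if mask == 0: return 0
-- head = (1 << mapping[0]) if (mask & 1) else 0
-- return head | transform_mask(mask >> 1, mapping[1:])
-- fuel makes the recursion total; pyGet? = none (IndexError) and a negative shift amount
-- (ValueError) return 0 here — those inputs are excluded by Pre_ below.
def tmRecB (fuel : Nat) (mask : Int) (mapping : List Int) : Int :=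
  match fuel with
  | 0 => 0
  | fuel + 1 =>
    if mask = 0 then 0
    else
      let head : Int :=
        if PySem.Int.band mask 1 ≠ 0 then
          match PySem.List.pyGet? mapping 0 with
          | none => 0
          | some m0 => if 0 ≤ m0 then (1 : Int) <<< m0.toNat else 0
        else 0
      PySem.Int.bor head (tmRecB fuel (PySem.Int.floordiv mask 2) (PySem.List.slice mapping (some 1) none))

def transform_mask_alt (mask : Int) (mapping : List Int) : Int :=
  tmRecB (mask.natAbs + 1) mask mapping

-- ===== PRECONDITION & SPEC =====
-- Pre_ = exactly where A returns: mask ≥ 0 (A loops forever on negative mask) and every set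
-- bit's mapping entry exists (else IndexError) and is ≥ 0 (else ValueError on 1 << negative).
def Pre_transform_mask (mask : Int) (mapping : List Int) : Prop :=
  0 ≤ mask ∧ ∀ p ∈ List.range (PySem.Int.bitLength mask),
    PySem.Int.band mask ((1 : Int) <<< p) ≠ 0 → p < mapping.length ∧ 0 ≤ mapping.getD p 0
instance (mask : Int) (mapping : List Int) : Decidable (Pre_transform_mask mask mapping) := by
  unfold Pre_transform_mask; infer_instance
def pvWitness_transform_mask : Int × List Int := (5, [1, 0, 3])
def Spec_transform_mask (mask : Int) (mapping : List Int) (out : Int) : Prop := out = transform_mask_alt mask mapping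
instance (mask : Int) (mapping : List Int) (out : Int) : Decidable (Spec_transform_mask mask mapping out) := by unfold Spec_transform_mask; infer_instance

-- ===== CLAIM (what is proved, stated in full; the proofs are below) =====
def Claim_equal_transform_mask : Prop := ∀ (mask : Int) (mapping : List Int), Dom_transform_mask mask mapping → Pre_transform_mask mask mapping → Spec_transform_mask mask mapping (transform_mask mask mapping)

-- ===== LEMMAS AND PROOFS =====

-- position of the lowest set bit (proof-side helper only)
def lowBit (n : Nat) : Nat :=
  if h : n = 0 then 0
  else if n % 2 = 1 then 0 else lowBit (n / 2) + 1
termination_by n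
decreasing_by omega

-- ascending list of set-bit positions of n below k
def bitsList (n k : Nat) : List Nat := (List.range k).filter (fun p => n.testBit p)

-- the common loop body both ports perform for an in-range set bit p
def gFun (mapping : List Int) (acc : Int) (p : Nat) : Int :=
  PySem.Int.bor acc ((1 : Int) <<< (mapping.getD p 0).toNat)

-- Nat-level contribution of position p and Nat-level fold (proof-side)
def natC (mapping : List Int) (p : Nat) : Nat := 2 ^ (mapping.getD p 0).toNat
def natFold (mapping : List Int) (a : Nat) (L : List Nat) : Nat :=
  L.foldl (fun x p => x ||| natC mapping p) a

theorem shl_one_int (p : Nat) : (1 : Int) <<< p = ((2 ^ p : Nat) : Int) := by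
  simp [Int.shiftLeft_eq]

theorem band_two_pow_ne (n p : Nat) :
    (PySem.Int.band ↑n ((1 : Int) <<< p) ≠ 0) ↔ n.testBit p := by
  rw [shl_one_int, PySem.Int.band_natCast, Nat.and_two_pow]
  cases h : n.testBit p <;> simp [h]

theorem two_pow_le_of_testBit {n i : Nat} (h : n.testBit i = true) : 2 ^ i ≤ n := by
  by_contra hc
  push_neg at hc
  rw [Nat.testBit_lt_two_pow hc] at h
  simp at h

theorem odd_and_pred {n : Nat} (h : n % 2 = 1) : n &&& (n - 1) = n - 1 := by
  apply Nat.eq_of_testBit_eq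
  intro i
  cases i with
  | zero => simp [Nat.testBit_zero, h]
  | succ i =>
    rw [Nat.testBit_land]
    simp only [Nat.testBit_add_one]
    have h2 : (n - 1) / 2 = n / 2 := by omega
    rw [h2]; simp

theorem odd_xor_one {n : Nat} (h : n % 2 = 1) : n ^^^ 1 = n - 1 := by
  apply Nat.eq_of_testBit_eq
  intro i
  cases i with
  | zero => simp [Nat.testBit_zero, h]; omega
  | succ i =>
    rw [Nat.testBit_xor]
    simp only [Nat.testBit_add_one]
    have h2 : (n - 1) / 2 = n / 2 := by omega
    have h3 : (1 : Nat) / 2 = 0 := by norm_num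
    rw [h2, h3]; simp [Nat.zero_testBit]

theorem even_and_pred (m : Nat) : (2 * m) &&& (2 * m - 1) = 2 * (m &&& (m - 1)) := by
  apply Nat.eq_of_testBit_eq
  intro i
  cases i with
  | zero => simp [Nat.testBit_zero, Nat.mul_mod_right]
  | succ i =>
    rw [Nat.testBit_land]
    simp only [Nat.testBit_add_one]
    have h1 : 2 * m / 2 = m := by omega
    have h2 : (2 * m - 1) / 2 = m - 1 := by omega
    have h3 : 2 * (m &&& (m - 1)) / 2 = m &&& (m - 1) := by omega
    rw [h1, h2, h3, Nat.testBit_land]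

theorem two_mul_xor (a b : Nat) : (2 * a) ^^^ (2 * b) = 2 * (a ^^^ b) := by
  apply Nat.eq_of_testBit_eq
  intro i
  cases i with
  | zero => simp [Nat.testBit_zero, Nat.mul_mod_right]
  | succ i =>
    rw [Nat.testBit_xor]
    simp only [Nat.testBit_add_one]
    have h1 : 2 * a / 2 = a := by omega
    have h2 : 2 * b / 2 = b := by omega
    have h3 : 2 * (a ^^^ b) / 2 = a ^^^ b := by omega
    rw [h1, h2, h3, Nat.testBit_xor]

theorem lowBit_spec : ∀ n : Nat, 0 < n →
    n.testBit (lowBit n) = true ∧ (∀ i < lowBit n, n.testBit i = false) ∧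
    n &&& (n - 1) = n - 2 ^ lowBit n ∧ n ^^^ 2 ^ lowBit n = n - 2 ^ lowBit n := by
  intro n
  induction n using Nat.strong_induction_on with
  | _ n ih =>
    intro hn
    by_cases hodd : n % 2 = 1
    · have hL : lowBit n = 0 := by rw [lowBit]; simp [Nat.pos_iff_ne_zero.mp hn, hodd]
      refine ⟨?_, ?_, ?_, ?_⟩
      · rw [hL]; simp [Nat.testBit_zero, hodd]
      · rw [hL]; omega
      · rw [hL, pow_zero, odd_and_pred hodd]
      · rw [hL, pow_zero, odd_xor_one hodd]
    · have hev : n % 2 = 0 := by omega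
      set m := n / 2 with hm
      have hn2 : n = 2 * m := by omega
      have hmpos : 0 < m := by omega
      have hL : lowBit n = lowBit m + 1 := by
        rw [lowBit]; simp [Nat.pos_iff_ne_zero.mp hn, hodd, hm]
      obtain ⟨ib, ilow, iand, ixor⟩ := ih m (by omega) hmpos
      have hle : 2 ^ lowBit m ≤ m := two_pow_le_of_testBit ib
      refine ⟨?_, ?_, ?_, ?_⟩
      · rw [hL, Nat.testBit_add_one, ← hm]; exact ib
      · rw [hL]
        intro i hi
        cases i with
        | zero => simp [Nat.testBit_zero, hev]
        | succ i => rw [Nat.testBit_add_one, ← hm]; exact ilow i (by omega)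
      · rw [hL, hn2, even_and_pred, iand, pow_succ]; omega
      · rw [hL, hn2, pow_succ, mul_comm (2 ^ lowBit m) 2, two_mul_xor, ixor]; omega

theorem band_neg_self (n : Nat) (hn : 0 < n) :
    PySem.Int.band ↑n (-↑n) = ((2 ^ lowBit n : Nat) : Int) := by
  obtain ⟨hb, -, hand, -⟩ := lowBit_spec n hn
  have hle : 2 ^ lowBit n ≤ n := two_pow_le_of_testBit hb
  have h0 : (0 : Int) ≤ ↑n := by positivity
  have h1 : ¬ (0 : Int) ≤ -↑n := by omega
  simp only [PySem.Int.band]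
  rw [if_pos h0, if_neg h1]
  have h2 : (-(-(n : Int)) - 1).toNat = n - 1 := by omega
  rw [h2, Int.toNat_natCast, hand]
  have h4 : n - (n - 2 ^ lowBit n) = 2 ^ lowBit n := Nat.sub_sub_self hle
  rw [h4]

theorem bitLength_two_pow (L : Nat) : PySem.Int.bitLength ((2 ^ L : Nat) : Int) = L + 1 := by
  induction L with
  | zero => decide
  | succ L ih =>
    rw [PySem.Int.bitLength_natCast (show (0 : Nat) < 2 ^ (L + 1) by positivity)]
    have h : 2 ^ (L + 1) / 2 = 2 ^ L := by rw [pow_succ]; omega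
    rw [h, ih]

theorem bitsList_zero (k : Nat) : bitsList 0 k = [] := by
  simp [bitsList]

theorem bitsList_cons {n : Nat} (hn : 0 < n) :
    ∀ k, lowBit n < k → bitsList n k = lowBit n :: bitsList (n ^^^ 2 ^ lowBit n) k := by
  obtain ⟨hb, hlow, -, -⟩ := lowBit_spec n hn
  set L := lowBit n with hLdef
  have hbit' : ∀ p, (n ^^^ 2 ^ L).testBit p = (n.testBit p).xor (decide (L = p)) := by
    intro p; rw [Nat.testBit_xor, Nat.testBit_two_pow]
  intro k hk
  induction k, hk using Nat.le_induction with
  | base =>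
    have hlo : (List.range L).filter (fun p => n.testBit p) = [] := by
      rw [List.filter_eq_nil_iff]
      intro p hp
      simp [hlow p (List.mem_range.mp hp)]
    have hlo' : (List.range (L + 1)).filter (fun p => (n ^^^ 2 ^ L).testBit p) = [] := by
      rw [List.filter_eq_nil_iff]
      intro p hp
      have hp' := List.mem_range.mp hp
      rw [hbit' p]
      by_cases hpL : p = L
      · subst hpL; simp [hb]
      · have hLp : L ≠ p := fun h => hpL h.symm
        simp [hlow p (by omega), hLp]
    have h1 : (List.range (L + 1)).filter (fun p => n.testBit p) = [L] := by
      rw [List.range_succ, List.filter_append, hlo]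
      simp [hb]
    unfold bitsList
    rw [h1, hlo']
  | succ k hk ih =>
    unfold bitsList at *
    have heq : (n ^^^ 2 ^ L).testBit k = n.testBit k := by
      rw [hbit' k]
      have : L ≠ k := by omega
      simp [this]
    rw [List.range_succ, List.filter_append, List.filter_append, ih]
    simp only [List.filter_cons, List.filter_nil, heq, List.cons_append]

theorem loopA_eq (mapping : List Int) : ∀ (fuel n : Nat) (acc : Int) (k : Nat), n < fuel → n < 2 ^ k →
    (∀ p, n.testBit p = true → p < mapping.length ∧ 0 ≤ mapping.getD p 0) →
    tmLoopA mapping fuel ↑n acc = (bitsList n k).foldl (gFun mapping) acc := by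
  intro fuel
  induction fuel with
  | zero => intro n acc k h; omega
  | succ fuel ih =>
    intro n acc k hfuel hk H
    by_cases hn : n = 0
    · subst hn; simp [tmLoopA, bitsList_zero]
    · have hpos : 0 < n := Nat.pos_of_ne_zero hn
      obtain ⟨hb, -, -, hxor⟩ := lowBit_spec n hpos
      set L := lowBit n with hLdef
      have hle : 2 ^ L ≤ n := two_pow_le_of_testBit hb
      have hLk : L < k := by
        have : 2 ^ L < 2 ^ k := by omega
        exact (Nat.pow_lt_pow_iff_right one_lt_two).mp this
      obtain ⟨hlen, hnn⟩ := H L hb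
      have hget : PySem.List.pyGet? mapping (L : Int) = some (mapping.getD L 0) := by
        rw [PySem.List.pyGet?_natCast]
        simp [List.getD, hlen]
      have hstep : tmLoopA mapping (fuel + 1) ↑n acc
          = tmLoopA mapping fuel (PySem.Int.bxor ↑n ((2 ^ L : Nat) : Int)) (gFun mapping acc L) := by
        rw [tmLoopA]
        have hm : ((n : Int) ≠ 0) := by exact_mod_cast hn
        rw [if_pos hm]
        simp only [band_neg_self n hpos, bitLength_two_pow, Nat.add_sub_cancel]
        rw [← hLdef, hget]
        simp only [gFun, if_pos hnn]
      rw [hstep, PySem.Int.bxor_natCast, bitsList_cons hpos k hLk, List.foldl_cons]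
      have h2L : 0 < 2 ^ L := by positivity
      apply ih
      · rw [hxor]; omega
      · rw [hxor]; omega
      · intro p hp
        apply H p
        rw [Nat.testBit_xor, Nat.testBit_two_pow] at hp
        by_cases hpL : L = p
        · subst hpL; rw [hb] at hp; simp at hp
        · simpa [hpL] using hp

-- ===== B-side lemmas =====

theorem getD_tail (mapping : List Int) (p : Nat) :
    mapping.tail.getD p 0 = mapping.getD (p + 1) 0 := by
  cases mapping <;> simp [List.getD]

theorem foldlg_cast (mapping : List Int) :
    ∀ (L : List Nat) (a : Nat), L.foldl (gFun mapping) ↑a = ↑(natFold mapping a L) := by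
  intro L
  induction L with
  | nil => intro a; simp [natFold]
  | cons p L ih =>
    intro a
    have h : gFun mapping ↑a p = ↑(a ||| natC mapping p) := by
      rw [gFun, shl_one_int, PySem.Int.bor_natCast, natC]
    rw [List.foldl_cons, h, ih]
    simp [natFold]

theorem natFold_pull (mapping : List Int) :
    ∀ (L : List Nat) (a : Nat), natFold mapping a L = a ||| natFold mapping 0 L := by
  intro L
  induction L with
  | nil => intro a; simp [natFold]
  | cons p L ih =>
    intro a
    show natFold mapping (a ||| natC mapping p) L = a ||| natFold mapping (0 ||| natC mapping p) L
    rw [ih (a ||| natC mapping p), ih (0 ||| natC mapping p), Nat.zero_or, Nat.or_assoc]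

theorem bitsList_split {n k : Nat} (hk : 0 < k) :
    bitsList n k = (if n.testBit 0 then [0] else []) ++ (bitsList (n / 2) (k - 1)).map (· + 1) := by
  obtain ⟨k', rfl⟩ : ∃ k', k = k' + 1 := ⟨k - 1, by omega⟩
  unfold bitsList
  rw [List.range_succ_eq_map, List.filter_cons, List.filter_map]
  have h : ((fun p => n.testBit p) ∘ Nat.succ) = fun p => (n / 2).testBit p := by
    funext p; simp [Function.comp, Nat.testBit_add_one]
  rw [h]
  simp only [Nat.add_sub_cancel]
  cases hb : n.testBit 0 <;> simp [hb]

theorem recB_eq (fuel : Nat) : ∀ (n : Nat) (mapping : List Int) (k : Nat), n < fuel → n < 2 ^ k →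
    (∀ p, n.testBit p = true → p < mapping.length ∧ 0 ≤ mapping.getD p 0) →
    tmRecB fuel ↑n mapping = (bitsList n k).foldl (gFun mapping) 0 := by
  induction fuel with
  | zero => intro n mapping k h; omega
  | succ fuel ih =>
    intro n mapping k hfuel hk H
    by_cases hn : n = 0
    · subst hn; simp [tmRecB, bitsList_zero]
    · have hpos : 0 < n := Nat.pos_of_ne_zero hn
      have hk1 : 0 < k := by
        by_contra h; push_neg at h
        interval_cases k; simp at hk; omega
      have hmn : ((n : Int) ≠ 0) := by exact_mod_cast hn
      have hH' : ∀ p, (n / 2).testBit p = true → p < mapping.tail.length ∧ 0 ≤ mapping.tail.getD p 0 := by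
        intro p hp
        rw [← Nat.testBit_add_one] at hp
        obtain ⟨h1, h2⟩ := H (p + 1) hp
        constructor
        · cases mapping with
          | nil => simp at h1
          | cons x xs => simpa using h1
        · rw [getD_tail]; exact h2
      have hrec : tmRecB fuel (PySem.Int.floordiv ↑n 2) (PySem.List.slice mapping (some 1) none)
          = (bitsList (n / 2) (k - 1)).foldl (gFun mapping.tail) 0 := by
        rw [PySem.List.slice_from_one]
        rw [show PySem.Int.floordiv (n : Int) 2 = ((n / 2 : Nat) : Int) from by
          exact_mod_cast PySem.Int.floordiv_natCast n 2]
        exact ih (n / 2) mapping.tail (k - 1) (by omega) (by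
          have : 2 ^ k = 2 * 2 ^ (k - 1) := by
            rw [← pow_succ']; congr 1; omega
          omega) hH'
      have hmapfold : ∀ (a : Int),
          ((bitsList (n / 2) (k - 1)).map (· + 1)).foldl (gFun mapping) a
            = (bitsList (n / 2) (k - 1)).foldl (gFun mapping.tail) a := by
        intro a
        rw [List.foldl_map]
        apply PySem.List.foldl_congr_mem
        intro x p _
        simp [gFun, getD_tail]
      rw [tmRecB, if_neg (by exact hmn), hrec, bitsList_split hk1]
      by_cases hb : n.testBit 0
      · have hb1 : PySem.Int.band (↑n) 1 ≠ 0 := by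
          have := (band_two_pow_ne n 0).mpr hb
          simpa using this
        obtain ⟨hlen, hnn⟩ := H 0 hb
        have hget : PySem.List.pyGet? mapping 0 = some (mapping.getD 0 0) := by
          have : PySem.List.pyGet? mapping ((0 : Nat) : Int) = some (mapping.getD 0 0) := by
            rw [PySem.List.pyGet?_natCast]; simp [List.getD, hlen]
          simpa using this
        simp only [hb1, ne_eq, not_false_eq_true, if_true, hget, if_pos hnn]
        rw [if_pos hb, List.cons_append, List.nil_append, List.foldl_cons, hmapfold]
        have hsh : (1 : Int) <<< (mapping.getD 0 0).toNat = ((natC mapping 0 : Nat) : Int) := by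
          rw [shl_one_int, natC]
        have hgz : gFun mapping 0 0 = ((natC mapping 0 : Nat) : Int) := by
          rw [gFun, hsh, show (0 : Int) = ((0 : Nat) : Int) from rfl, PySem.Int.bor_natCast]
          simp
        rw [hgz, hsh, show (0 : Int) = ((0 : Nat) : Int) from rfl, foldlg_cast, foldlg_cast,
          PySem.Int.bor_natCast,
          natFold_pull mapping.tail (bitsList (n / 2) (k - 1)) (natC mapping 0)]
      · have hb1 : ¬ PySem.Int.band (↑n) 1 ≠ 0 := by
          intro h
          exact hb ((band_two_pow_ne n 0).mp (by simpa using h))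
        simp only [hb1, if_false, if_neg hb, List.nil_append, hmapfold]
        rw [PySem.Int.bor_comm, PySem.Int.bor_zero]

-- ===== VERDICT (by name: the statement is the Claim_ definition above) =====
theorem transform_mask_spec : Claim_equal_transform_mask := by
  intro mask mapping _ hpre
  obtain ⟨hm0, hPre⟩ := hpre
  obtain ⟨n, rfl⟩ : ∃ n : Nat, mask = (n : Int) := ⟨mask.toNat, by omega⟩
  rw [Spec_transform_mask]
  have hlt : n < 2 ^ PySem.Int.bitLength (n : Int) := by
    have := PySem.Int.lt_two_pow_bitLength (n : Int)
    simpa using this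
  have H : ∀ p, n.testBit p = true → p < mapping.length ∧ 0 ≤ mapping.getD p 0 := by
    intro p hp
    apply hPre p
    · rw [List.mem_range]
      have h1 : 2 ^ p ≤ n := two_pow_le_of_testBit hp
      exact (Nat.pow_lt_pow_iff_right one_lt_two).mp (by omega)
    · exact (band_two_pow_ne n p).mpr hp
  rw [transform_mask, transform_mask_alt]
  have hfuel : ((n : Int)).natAbs + 1 = n + 1 := by simp
  rw [hfuel, loopA_eq mapping (n + 1) n 0 (PySem.Int.bitLength (n : Int)) (by omega) hlt H,
    recB_eq (n + 1) n mapping (PySem.Int.bitLength (n : Int)) (by omega) hlt H]
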